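-- pv_equiv track=rewrite | github.com/MousaZourob/InterviewPrep | LC/Hard/296.py | minTotalDistance
-- ===== SOURCE A (Python) =====
-- from typing import List
--
-- def minTotalDistance(grid: List[List[int]]) -> int:
--     m = len(grid)
--     n = len(grid[0])
--
--     rows = []
--     cols = []
--
--     for r in range(m):
--         for c in range(n):
--             if grid[r][c] == 1:
--                 rows.append(r)
--                 cols.append(c)
--
--     rows.sort()
--     cols.sort()
--
--     rows_med = rows[len(rows)//2]
--     cols_med = cols[len(cols)//2]
--
--     return sum(abs(row - rows_med) for row in rows) + sum(abs(col - cols_med) for col in cols)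
-- ===== SOURCE B (Python) =====
-- from typing import List
--
-- def minTotalDistance(grid: List[List[int]]) -> int:
--     n = len(grid[0])
--     rows = sorted(r for r, row in enumerate(grid) for c in range(n) if row[c] == 1)
--     cols = sorted(c for row in grid for c, v in enumerate(row[:n]) if v == 1)
--
--     def pair_span_sum(xs):
--         # Pair the k-th smallest with the k-th largest, outside-in: each pair
--         # contributes its span, no median is ever computed.  The extreme pair
--         # xs[-1] - xs[0] anchors the pointers (and fails on an empty axis).
--         total = xs[-1] - xs[0]
--         i, j = 1, len(xs) - 2
--         while i < j:
--             total += xs[j] - xs[i]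
--             i += 1
--             j -= 1
--         return total
--
--     return pair_span_sum(rows) + pair_span_sum(cols)
-- ===== Notes on version B (the rewrite author's own statement) =====
-- stated objective: alternative
-- what changed: B collects the 1-coordinates by direct enumeration over the grid's first-row-width prefix and replaces A's median computation plus per-element absolute-deviation sums with a two-pointer outside-in pass that pairs the k-th smallest with the k-th largest coordinate (anchored at the extreme pair) and adds each pair's span; no median is ever taken.
import Mathlib
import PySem

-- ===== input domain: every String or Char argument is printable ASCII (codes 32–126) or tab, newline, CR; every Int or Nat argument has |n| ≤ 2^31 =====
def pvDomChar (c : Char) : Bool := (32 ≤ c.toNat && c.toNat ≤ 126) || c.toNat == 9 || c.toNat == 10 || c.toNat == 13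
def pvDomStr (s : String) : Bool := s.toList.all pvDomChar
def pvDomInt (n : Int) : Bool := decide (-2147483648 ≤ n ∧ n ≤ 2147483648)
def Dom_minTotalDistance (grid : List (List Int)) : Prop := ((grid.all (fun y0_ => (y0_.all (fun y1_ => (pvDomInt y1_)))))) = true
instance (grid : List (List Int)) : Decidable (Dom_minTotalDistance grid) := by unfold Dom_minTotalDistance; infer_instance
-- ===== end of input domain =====

-- B replaces A's median-then-absolute-deviation computation by an outside-in
-- two-pointer pass pairing extremes over each sorted axis (objective: alternative, same cost).

-- ===== PORT A =====
def minTotalDistance (grid : List (List Int)) : Int :=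
  let m : Int := (grid.length : Int)
  let n : Int := ((PySem.List.pyGetD grid 0 []).length : Int)
  let rc : List Int × List Int :=
    (PySem.List.pyRange 0 m 1).foldl (fun acc r =>
      (PySem.List.pyRange 0 n 1).foldl (fun acc2 c =>
        if PySem.List.pyGetD (PySem.List.pyGetD grid r []) c 0 = 1 then
          (acc2.1 ++ [r], acc2.2 ++ [c]) else acc2) acc) ([], [])
  let rows := PySem.List.sorted rc.1 (fun x => x) false
  let cols := PySem.List.sorted rc.2 (fun x => x) false
  let rows_med := PySem.List.pyGetD rows (PySem.Int.floordiv (rows.length : Int) 2) 0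
  let cols_med := PySem.List.pyGetD cols (PySem.Int.floordiv (cols.length : Int) 2) 0
  rows.foldl (fun s row => s + |row - rows_med|) 0 +
    cols.foldl (fun s col => s + |col - cols_med|) 0

-- ===== PORT B =====
-- 'r for r, row in enumerate(grid) for c in range(n) if row[c] == 1'
def pvRawRows (grid : List (List Int)) (n : Int) : List Int :=
  (PySem.List.enumerate grid 0).foldl
    (fun acc p => (PySem.List.pyRange 0 n 1).foldl
      (fun a c => if PySem.List.pyGetD p.2 c 0 = 1 then a ++ [p.1] else a) acc) []

-- 'c for row in grid for c, v in enumerate(row[:n]) if v == 1'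
def pvRawCols (grid : List (List Int)) (n : Int) : List Int :=
  grid.foldl
    (fun acc row => (PySem.List.enumerate (PySem.List.slice row none (some n)) 0).foldl
      (fun a q => if q.2 = 1 then a ++ [q.1] else a) acc) []

-- the 'while i < j' two-pointer loop of pair_span_sum
def pairSpanLoop (xs : List Int) (i j total : Int) : Int :=
  if i < j then
    pairSpanLoop xs (i + 1) (j - 1)
      (total + PySem.List.pyGetD xs j 0 - PySem.List.pyGetD xs i 0)
  else total
termination_by (j - i).toNat
decreasing_by simp_wf; omega

-- 'pair_span_sum(xs)': the extreme pair xs[-1] - xs[0] anchors, then the loop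
def pvPairSpanSum (xs : List Int) : Int :=
  pairSpanLoop xs 1 ((xs.length : Int) - 2)
    (PySem.List.pyGetD xs (-1) 0 - PySem.List.pyGetD xs 0 0)

def minTotalDistance_alt (grid : List (List Int)) : Int :=
  let n : Int := ((PySem.List.pyGetD grid 0 []).length : Int)
  let rows := PySem.List.sorted (pvRawRows grid n) (fun x => x) false
  let cols := PySem.List.sorted (pvRawCols grid n) (fun x => x) false
  pvPairSpanSum rows + pvPairSpanSum cols

-- ===== PRECONDITION & SPEC =====
-- Pre_ excludes exactly the inputs where the Python A raises IndexError: the empty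
-- grid, a grid with a row shorter than the first row (the scan indexes the first
-- len(grid[0]) cells of every row), and grids with no 1 in that scanned area
-- (rows[len(rows)//2] on an empty list).  B raises on exactly the same inputs.
def Pre_minTotalDistance (grid : List (List Int)) : Prop :=
  (∀ row ∈ grid, (grid.headD []).length ≤ row.length) ∧
  ∃ row ∈ grid, (1 : Int) ∈ row.take (grid.headD []).length
instance (grid : List (List Int)) : Decidable (Pre_minTotalDistance grid) := by
  unfold Pre_minTotalDistance; infer_instance

def pvWitness_minTotalDistance : List (List Int) := [[0, 1], [1, 0]]

def Spec_minTotalDistance (grid : List (List Int)) (out : Int) : Prop := out = minTotalDistance_alt grid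
instance (grid : List (List Int)) (out : Int) : Decidable (Spec_minTotalDistance grid out) := by unfold Spec_minTotalDistance; infer_instance

-- ===== CLAIM (what is proved, stated in full; the proofs are below) =====
def Claim_equal_minTotalDistance : Prop := ∀ (grid : List (List Int)), Dom_minTotalDistance grid → Pre_minTotalDistance grid → Spec_minTotalDistance grid (minTotalDistance grid)

-- ===== LEMMAS AND PROOFS =====

-- A's simultaneous (rows, cols) accumulation splits into two independent folds.
theorem pv_fold_pair_split (l : List Int) (P : Int → Prop) [DecidablePred P]
    (f g : Int → Int) (a b : List Int) :
    l.foldl (fun s e => if P e then (s.1 ++ [f e], s.2 ++ [g e]) else s) (a, b) =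
      (l.foldl (fun s e => if P e then s ++ [f e] else s) a,
       l.foldl (fun s e => if P e then s ++ [g e] else s) b) := by
  induction l generalizing a b with
  | nil => rfl
  | cons x t ih => by_cases h : P x <;> simp [h, ih]

-- Sorted access is monotone in the index (getD form).
theorem pv_sorted_getD_mono (xs : List Int) (h : xs.Pairwise (· ≤ ·))
    (i j : Nat) (hij : i ≤ j) (hj : j < xs.length) :
    xs.getD i 0 ≤ xs.getD j 0 := by
  rcases Nat.lt_or_eq_of_le hij with hlt | rfl
  · rw [List.getD_eq_getElem xs 0 (lt_of_le_of_lt hij hj), List.getD_eq_getElem xs 0 hj]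
    exact List.pairwise_iff_getElem.mp h i j _ hj hlt
  · exact le_refl _

-- The loop's accumulator factors out.
theorem pv_pairSpanLoop_acc (xs : List Int) (n : Nat) :
    ∀ (i j t : Int), (j - i).toNat = n →
      pairSpanLoop xs i j t = t + pairSpanLoop xs i j 0 := by
  induction n using Nat.strong_induction_on with
  | _ n ih =>
  intro i j t hn
  conv_lhs => rw [pairSpanLoop]
  conv_rhs => rw [pairSpanLoop]
  by_cases h : i < j
  · simp only [if_pos h]
    rw [ih (j - 1 - (i + 1)).toNat (by omega) _ _ _ rfl,
      ih (j - 1 - (i + 1)).toNat (by omega) (i + 1) (j - 1)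
        (0 + PySem.List.pyGetD xs j 0 - PySem.List.pyGetD xs i 0) rfl]
    ring
  · simp [h]

-- Interior indices of a :: u ++ [b] read u.
theorem pv_pairSpanLoop_shift (u : List Int) (a b : Int) (n : Nat) :
    ∀ (i j t : Int), (j - i).toNat = n → 0 ≤ i → j < (u.length : Int) →
      pairSpanLoop (a :: u ++ [b]) (i + 1) (j + 1) t = pairSpanLoop u i j t := by
  induction n using Nat.strong_induction_on with
  | _ n ih
  intro i j t hn hi hj
  conv_lhs => rw [pairSpanLoop]
  conv_rhs => rw [pairSpanLoop]
  by_cases h : i < j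
  · have h' : i + 1 < j + 1 := by omega
    simp only [if_pos h, if_pos h']
    have hgj : PySem.List.pyGetD (a :: u ++ [b]) (j + 1) 0 = PySem.List.pyGetD u j 0 := by
      rw [show (j + 1 : Int) = ((j.toNat + 1 : Nat) : Int) by omega,
        show (j : Int) = ((j.toNat : Nat) : Int) by omega,
        PySem.List.pyGetD_natCast, PySem.List.pyGetD_natCast]
      simp only [Int.toNat_natCast]
      show (u ++ [b]).getD j.toNat 0 = u.getD j.toNat 0
      exact List.getD_append u [b] 0 j.toNat (by omega)
    have hgi : PySem.List.pyGetD (a :: u ++ [b]) (i + 1) 0 = PySem.List.pyGetD u i 0 := by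
      rw [show (i + 1 : Int) = ((i.toNat + 1 : Nat) : Int) by omega,
        show (i : Int) = ((i.toNat : Nat) : Int) by omega,
        PySem.List.pyGetD_natCast, PySem.List.pyGetD_natCast]
      simp only [Int.toNat_natCast]
      show (u ++ [b]).getD i.toNat 0 = u.getD i.toNat 0
      exact List.getD_append u [b] 0 i.toNat (by omega)
    rw [hgj, hgi]
    rw [show (j + 1 - 1 : Int) = (j - 1) + 1 by ring]
    exact ih (j - 1 - (i + 1)).toNat (by omega) (i + 1) (j - 1) _ rfl (by omega) (by omega)
  · have h' : ¬ (i + 1 < j + 1) := by omega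
    simp [h, h']

-- Core: on a nondecreasing list, the sum of absolute deviations from xs[len/2]
-- equals the extreme-anchored outside-in two-pointer pair-span sum.
theorem pv_core_nat (n : Nat) : ∀ xs : List Int, xs.length = n → xs.Pairwise (· ≤ ·) →
    (xs.map (fun x => |x - xs.getD (xs.length / 2) 0|)).sum = pvPairSpanSum xs := by
  induction n using Nat.strong_induction_on with
  | _ n ih =>
  intro xs hlen hsort
  rcases xs with _ | ⟨a, t⟩
  · have hd : PySem.List.pyGetD ([] : List Int) (-1) 0 = 0 := by decide
    have hd0 : PySem.List.pyGetD ([] : List Int) 0 0 = 0 := by decide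
    simp only [pvPairSpanSum, hd, hd0, List.map_nil, List.sum_nil]
    rw [pairSpanLoop]
    norm_num
  rcases List.eq_nil_or_concat t with rfl | ⟨u, b, rfl⟩
  · -- singleton [a]
    have hm1 : PySem.List.pyGetD [a] (-1) 0 = a := by
      rw [PySem.List.pyGetD_neg_one [a] 0 (by simp)]; simp
    have h0 : PySem.List.pyGetD [a] 0 0 = a := by
      rw [PySem.List.pyGetD_zero]; simp
    simp only [pvPairSpanSum, hm1, h0]
    rw [pairSpanLoop]
    norm_num
  simp only [List.concat_eq_append] at hlen hsort ⊢
  have hl : (a :: (u ++ [b])).length = u.length + 2 := by simp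
  have half : (a :: (u ++ [b])).length / 2 = u.length / 2 + 1 := by rw [hl]; omega
  have hmed : (a :: (u ++ [b])).getD (u.length / 2 + 1) 0 = (u ++ [b]).getD (u.length / 2) 0 := by
    simp
  have hgb : (a :: (u ++ [b])).getD (u.length + 1) 0 = b := by
    have h2 : (u ++ [b]).getD u.length 0 = b := by
      rw [List.getD_append_right u [b] 0 u.length (le_refl _)]; simp
    rw [List.getD_cons_succ]; exact h2
  have ham : a ≤ (u ++ [b]).getD (u.length / 2) 0 := by
    have := pv_sorted_getD_mono _ hsort 0 (u.length / 2 + 1) (by omega) (by rw [hl]; omega)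
    rw [hmed] at this; simpa using this
  have hmb : (u ++ [b]).getD (u.length / 2) 0 ≤ b := by
    have := pv_sorted_getD_mono _ hsort (u.length / 2 + 1) (u.length + 1) (by omega)
      (by rw [hl]; omega)
    rwa [hgb, hmed] at this
  have hpu : u.Pairwise (· ≤ ·) := (List.pairwise_append.mp (List.pairwise_cons.mp hsort).2).1
  have hLHS : ((a :: (u ++ [b])).map
        (fun x => |x - (a :: (u ++ [b])).getD ((a :: (u ++ [b])).length / 2) 0|)).sum =
      (b - a) + (u.map (fun x => |x - (u ++ [b]).getD (u.length / 2) 0|)).sum := by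
    rw [half]
    simp only [hmed, List.map_cons, List.map_append, List.map_nil, List.sum_cons,
      List.sum_append, List.sum_nil]
    rw [abs_of_nonpos (by omega : a - (u ++ [b]).getD (u.length / 2) 0 ≤ 0),
      abs_of_nonneg (by omega : (0:Int) ≤ b - (u ++ [b]).getD (u.length / 2) 0)]
    ring
  -- the anchored first pair of the two-pointer pass
  have hstep : pvPairSpanSum (a :: (u ++ [b])) =
      pairSpanLoop (a :: (u ++ [b])) 1 (u.length : Int) (b - a) := by
    have hm1 : PySem.List.pyGetD (a :: (u ++ [b])) (-1) 0 = b := by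
      rw [show (a :: (u ++ [b])) = (a :: u) ++ [b] from rfl]
      exact PySem.List.pyGetD_neg_one_append_singleton (a :: u) b 0
    have h0 : PySem.List.pyGetD (a :: (u ++ [b])) 0 0 = a := by
      rw [PySem.List.pyGetD_zero]; simp
    have hlen2 : ((a :: (u ++ [b])).length : Int) - 2 = (u.length : Int) := by
      rw [hl]; push_cast; ring
    simp only [pvPairSpanSum, hm1, h0, hlen2]
  rw [hLHS, hstep]
  rcases List.eq_nil_or_concat u with rfl | ⟨_, _, hne⟩
  · -- two-element list [a, b]
    rw [pairSpanLoop]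
    norm_num
  · have hune : u ≠ [] := by rw [hne]; simp
    have hk1 : 1 ≤ u.length := by
      cases u with | nil => exact absurd rfl hune | cons _ _ => simp
    have hmu : (u ++ [b]).getD (u.length / 2) 0 = u.getD (u.length / 2) 0 :=
      List.getD_append u [b] 0 _ (by omega)
    have hshift : pairSpanLoop (a :: (u ++ [b])) 1 (u.length : Int) (b - a) =
        pairSpanLoop u 0 ((u.length : Int) - 1) (b - a) := by
      have := pv_pairSpanLoop_shift u a b ((u.length : Int) - 1 - 0).toNat 0
        ((u.length : Int) - 1) (b - a) rfl (le_refl 0) (by omega)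
      rw [show ((u.length : Int) - 1) + 1 = (u.length : Int) by ring] at this
      simpa using this
    have hanchor : pvPairSpanSum u = pairSpanLoop u 1 ((u.length : Int) - 2)
        (PySem.List.pyGetD u (-1) 0 - PySem.List.pyGetD u 0 0) := rfl
    -- peel the anchored first pair of u's own pass to line the two passes up:
    -- pairSpanLoop u 0 (len u - 1) 0 is exactly pvPairSpanSum u
    have hufirst : pairSpanLoop u 0 ((u.length : Int) - 1) 0 = pvPairSpanSum u := by
      conv_lhs => rw [pairSpanLoop]
      by_cases h1 : (0 : Int) < (u.length : Int) - 1
      · simp only [if_pos h1]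
        have hm1u : PySem.List.pyGetD u ((u.length : Int) - 1) 0 = PySem.List.pyGetD u (-1) 0 := by
          rw [PySem.List.pyGetD_neg_one u 0 hune,
            PySem.List.pyGetD_eq_getElem u 0 (by omega) (by omega)]
          rw [List.getLast_eq_getElem]
          congr 1
          omega
        rw [hm1u]
        simp only [zero_add]
        rw [show ((u.length : Int) - 1 - 1) = (u.length : Int) - 2 by ring, ← hanchor]
      · have hu1 : u.length = 1 := by omega
        simp only [if_neg h1, hanchor]
        rcases u with _ | ⟨x, v⟩
        · simp at hu1
        · have hv : v = [] := by simpa using hu1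
          subst hv
          have hm1 : PySem.List.pyGetD [x] (-1) 0 = x := by
            rw [PySem.List.pyGetD_neg_one [x] 0 (by simp)]; simp
          have h0x : PySem.List.pyGetD [x] 0 0 = x := by
            rw [PySem.List.pyGetD_zero]; simp
          simp only [hm1, h0x]
          rw [pairSpanLoop]
          norm_num
    rw [hshift, pv_pairSpanLoop_acc u ((u.length : Int) - 1 - 0).toNat 0 _ _ rfl, hufirst,
      hmu, ih u.length (by omega) u rfl hpu]

-- Core, PySem form: A's median-deviation loop equals B's pair_span_sum on a sorted list.
theorem pv_core (xs : List Int) (h : xs.Pairwise (· ≤ ·)) :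
    xs.foldl (fun s x =>
        s + |x - PySem.List.pyGetD xs (PySem.Int.floordiv (xs.length : Int) 2) 0|) 0 =
      pvPairSpanSum xs := by
  have hfd : PySem.Int.floordiv (xs.length : Int) 2 = ((xs.length / 2 : Nat) : Int) := by
    exact_mod_cast PySem.Int.floordiv_natCast xs.length 2
  rw [hfd, PySem.List.foldl_add]
  simp only [PySem.List.pyGetD_natCast, zero_add]
  exact pv_core_nat xs.length xs rfl h

-- Indexing below the first row's width reads the row's prefix.
theorem pv_take_getD (row : List Int) (nn : Nat) (h : nn ≤ row.length)
    (j : Int) (h0 : 0 ≤ j) (hj : j < (nn : Int)) :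
    PySem.List.pyGetD row j 0 = PySem.List.pyGetD (row.take nn) j 0 := by
  have hlt : j.toNat < nn := by omega
  rw [PySem.List.pyGetD_eq_getElem _ _ h0 (by omega),
    PySem.List.pyGetD_eq_getElem _ _ h0 (by simp; omega)]
  exact (List.getElem_take).symm

-- pyGetD grid 0 is grid's first row.
theorem pv_head_getD (grid : List (List Int)) (hne : grid ≠ []) :
    PySem.List.pyGetD grid 0 [] = grid.headD [] := by
  cases grid with
  | nil => exact absurd rfl hne
  | cons g gs => simp [PySem.List.pyGetD_zero]

-- A's index-driven collection of row coordinates equals B's enumerate-driven one.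
theorem pv_rows_eq (grid : List (List Int)) (n : Int) :
    (PySem.List.pyRange 0 (grid.length : Int) 1).foldl (fun a r =>
        (PySem.List.pyRange 0 n 1).foldl
          (fun a2 c => if PySem.List.pyGetD (PySem.List.pyGetD grid r []) c 0 = 1
            then a2 ++ [r] else a2) a) [] = pvRawRows grid n := by
  unfold pvRawRows
  rw [PySem.List.enumerate_eq_map_pyRange grid [], List.foldl_map]
  simp only [PySem.List.len_eq]

-- A's index-driven collection of column coordinates equals B's prefix-slice one.
theorem pv_cols_eq (grid : List (List Int)) (hne : grid ≠ [])
    (hw : ∀ row ∈ grid, (grid.headD []).length ≤ row.length) :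
    (PySem.List.pyRange 0 (grid.length : Int) 1).foldl (fun a r =>
        (PySem.List.pyRange 0 ((PySem.List.pyGetD grid 0 []).length : Int) 1).foldl
          (fun a2 c => if PySem.List.pyGetD (PySem.List.pyGetD grid r []) c 0 = 1
            then a2 ++ [c] else a2) a) [] =
      pvRawCols grid ((PySem.List.pyGetD grid 0 []).length : Int) := by
  unfold pvRawCols
  have step1 : ∀ (acc : List Int), ∀ r ∈ PySem.List.pyRange 0 (grid.length : Int) 1,
      (PySem.List.pyRange 0 ((PySem.List.pyGetD grid 0 []).length : Int) 1).foldl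
        (fun a2 c => if PySem.List.pyGetD (PySem.List.pyGetD grid r []) c 0 = 1
          then a2 ++ [c] else a2) acc =
      (PySem.List.enumerate (PySem.List.slice (PySem.List.pyGetD grid r []) none
          (some ((PySem.List.pyGetD grid 0 []).length : Int))) 0).foldl
        (fun a2 q => if q.2 = 1 then a2 ++ [q.1] else a2) acc := by
    intro acc r hr
    have hr' : 0 ≤ r ∧ r < (grid.length : Int) := by
      have := (PySem.List.mem_pyRange_one).mp hr; omega
    have hmem : PySem.List.pyGetD grid r [] ∈ grid :=
      PySem.List.pyGetD_mem grid [] (by simp [PySem.Raise.InRange]; omega)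
    have hlen := hw _ hmem
    have hN : ((PySem.List.pyGetD grid 0 []).length : Int) = ((grid.headD []).length : Int) := by
      rw [pv_head_getD grid hne]
    set row := PySem.List.pyGetD grid r [] with hrow
    set nn := (grid.headD []).length with hnn
    have htk : ((row.take nn).length : Int) = (nn : Int) := by simp; omega
    -- right side: row[:nn] is row.take nn, then enumerate is the index range
    rw [hN, PySem.List.slice_to_natCast,
      PySem.List.enumerate_eq_map_pyRange (row.take nn) 0, List.foldl_map]
    simp only [PySem.List.len_eq]
    -- left side: the index loop reads only the prefix
    rw [show (nn : Int) = ((row.take nn).length : Int) from htk.symm]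
    exact PySem.List.foldl_congr_mem _ _
      (fun a2 c => if PySem.List.pyGetD (row.take nn) c 0 = 1 then a2 ++ [c] else a2) _
      (by
        intro a2 c hc
        have hc' := (PySem.List.mem_pyRange_one).mp hc
        rw [pv_take_getD row nn hlen c hc'.1 (by omega)])
  rw [PySem.List.foldl_congr_mem _ _ _ _ step1]
  exact PySem.List.foldl_pyRange_zero_pyGetD' grid []
    (fun acc row => (PySem.List.enumerate (PySem.List.slice row none
      (some ((PySem.List.pyGetD grid 0 []).length : Int))) 0).foldl
      (fun a q => if q.2 = 1 then a ++ [q.1] else a) acc) []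

-- A's whole collection loop produces exactly B's two raw coordinate lists.
theorem pv_rc_eq (grid : List (List Int)) (hne : grid ≠ [])
    (hw : ∀ row ∈ grid, (grid.headD []).length ≤ row.length) :
    (PySem.List.pyRange 0 (grid.length : Int) 1).foldl (fun acc r =>
        (PySem.List.pyRange 0 ((PySem.List.pyGetD grid 0 []).length : Int) 1).foldl
          (fun acc2 c => if PySem.List.pyGetD (PySem.List.pyGetD grid r []) c 0 = 1
            then (acc2.1 ++ [r], acc2.2 ++ [c]) else acc2) acc) ([], []) =
      (pvRawRows grid ((PySem.List.pyGetD grid 0 []).length : Int),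
       pvRawCols grid ((PySem.List.pyGetD grid 0 []).length : Int)) := by
  have hsplit : ∀ (acc : List Int × List Int), ∀ r ∈ PySem.List.pyRange 0 (grid.length : Int) 1,
      (PySem.List.pyRange 0 ((PySem.List.pyGetD grid 0 []).length : Int) 1).foldl
        (fun acc2 c => if PySem.List.pyGetD (PySem.List.pyGetD grid r []) c 0 = 1
          then (acc2.1 ++ [r], acc2.2 ++ [c]) else acc2) acc =
      ((PySem.List.pyRange 0 ((PySem.List.pyGetD grid 0 []).length : Int) 1).foldl
        (fun a2 c => if PySem.List.pyGetD (PySem.List.pyGetD grid r []) c 0 = 1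
          then a2 ++ [r] else a2) acc.1,
       (PySem.List.pyRange 0 ((PySem.List.pyGetD grid 0 []).length : Int) 1).foldl
        (fun a2 c => if PySem.List.pyGetD (PySem.List.pyGetD grid r []) c 0 = 1
          then a2 ++ [c] else a2) acc.2) := by
    intro acc r _
    have := pv_fold_pair_split
      (PySem.List.pyRange 0 ((PySem.List.pyGetD grid 0 []).length : Int) 1)
      (fun c => PySem.List.pyGetD (PySem.List.pyGetD grid r []) c 0 = 1)
      (fun _ => r) (fun c => c) acc.1 acc.2
    simpa using this
  rw [PySem.List.foldl_congr_mem _ _ _ _ hsplit]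
  rw [PySem.List.foldl_prod_mk
    (f := fun a r => (PySem.List.pyRange 0 ((PySem.List.pyGetD grid 0 []).length : Int) 1).foldl
      (fun a2 c => if PySem.List.pyGetD (PySem.List.pyGetD grid r []) c 0 = 1
        then a2 ++ [r] else a2) a)
    (g := fun a r => (PySem.List.pyRange 0 ((PySem.List.pyGetD grid 0 []).length : Int) 1).foldl
      (fun a2 c => if PySem.List.pyGetD (PySem.List.pyGetD grid r []) c 0 = 1
        then a2 ++ [c] else a2) a)]
  rw [pv_rows_eq grid _, pv_cols_eq grid hne hw]

-- ===== VERDICT (by name: the statement is the Claim_ definition above) =====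
theorem minTotalDistance_spec : Claim_equal_minTotalDistance := by
  intro grid _ hpre
  obtain ⟨hw, row0, hrow0, h10⟩ := hpre
  have hne : grid ≠ [] := by
    intro h; rw [h] at hrow0; simp at hrow0
  unfold Spec_minTotalDistance minTotalDistance minTotalDistance_alt
  simp only
  rw [pv_rc_eq grid hne hw]
  simp only
  rw [pv_core (PySem.List.sorted (pvRawRows grid _) (fun x => x) false)
      (by simpa using PySem.List.sorted_pairwise (pvRawRows grid _) (fun x => x)),
    pv_core (PySem.List.sorted (pvRawCols grid _) (fun x => x) false)
      (by simpa using PySem.List.sorted_pairwise (pvRawCols grid _) (fun x => x))]
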